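-- pv_equiv track=rewrite | github.com/JMischa/Access_Informatics_1 | Left_Pascals_Triangle.py | build_string_pyramid
-- ===== SOURCE A (Python) =====
-- def build_string_pyramid(h):
--
--     # One idea is to start with an empty string and append individual lines
--     s = ""
--
--     for i in range(1, h + 1):
--         line = ''
--         for j in range(1, i + 1):
--             line += str(j)
--             if j < i:
--                 line += '*'
--         s += line + '\n'
--
--
--     for i in range(h-1, 0, -1):
--         line = ''
--         for j in range(1, i + 1):
--             line += str(j)
--             if j < i:
--                 line += '*'
--         s += line + '\n'
--     # You may want to use nested loops and the range() function
--
--     # Don't forget to return the result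
--     return s
-- ===== SOURCE B (Python) =====
-- def build_string_pyramid(h):
--     lines = ['*'.join(str(j) for j in range(1, i + 1)) for i in range(1, h + 1)]
--     full = lines + lines[:-1][::-1]
--     return ''.join(line + '\n' for line in full)
-- ===== Notes on version B (the rewrite author's own statement) =====
-- stated objective: simpler
-- what changed: B builds each ascending line exactly once with '*'.join over a comprehension and forms the descending half by reversing the list of already-built lines (lines + lines[:-1][::-1]), instead of A's two separate passes of nested character-appending loops that recompute every line of the descending half.
import Mathlib
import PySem

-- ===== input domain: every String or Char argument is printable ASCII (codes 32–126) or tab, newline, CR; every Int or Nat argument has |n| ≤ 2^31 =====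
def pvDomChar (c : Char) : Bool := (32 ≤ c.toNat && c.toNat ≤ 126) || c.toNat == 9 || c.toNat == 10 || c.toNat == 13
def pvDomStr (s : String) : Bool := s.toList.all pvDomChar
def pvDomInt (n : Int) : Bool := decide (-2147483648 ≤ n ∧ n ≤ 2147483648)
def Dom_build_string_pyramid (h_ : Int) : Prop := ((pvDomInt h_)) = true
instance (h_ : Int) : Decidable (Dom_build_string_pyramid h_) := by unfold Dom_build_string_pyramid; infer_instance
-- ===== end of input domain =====

-- B builds each line once and mirrors the list of lines instead of A's second nested recomputing pass (objective: simpler).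

-- ===== PORT A =====
-- A's inner loop (identical in both of A's passes): build one line by appending digits and '*'
def pvLineA (i : Int) : String :=
  (PySem.List.pyRange 1 (i+1) 1).foldl (fun line j =>
    if j < i then (line ++ PySem.Int.toStr j) ++ "*" else line ++ PySem.Int.toStr j) ""

def build_string_pyramid (h_ : Int) : String :=
  (PySem.List.pyRange (h_-1) 0 (-1)).foldl (fun s i => s ++ pvLineA i ++ "\n")
    ((PySem.List.pyRange 1 (h_+1) 1).foldl (fun s i => s ++ pvLineA i ++ "\n") "")

-- ===== PORT B =====
-- B's line: '*'.join(str(j) for j in range(1, i+1))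
def pvLineB (i : Int) : String :=
  PySem.Str.join "*" ((PySem.List.pyRange 1 (i+1) 1).map PySem.Int.toStr)

-- B's `lines` comprehension
def pvLinesB (h_ : Int) : List String :=
  (PySem.List.pyRange 1 (h_+1) 1).map pvLineB

def build_string_pyramid_alt (h_ : Int) : String :=
  PySem.Str.join ""
    ((pvLinesB h_ ++
      ((PySem.List.slice? (PySem.List.slice (pvLinesB h_) none (some (-1))) none none (-1)).getD [])).map
      (fun line => line ++ "\n"))

-- ===== PRECONDITION & SPEC =====
def Spec_build_string_pyramid (h_ : Int) (out : String) : Prop := out = build_string_pyramid_alt h_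
instance (h_ : Int) (out : String) : Decidable (Spec_build_string_pyramid h_ out) := by unfold Spec_build_string_pyramid; infer_instance

-- ===== CLAIM (what is proved, stated in full; the proofs are below) =====
def Claim_equal_build_string_pyramid : Prop := ∀ (h_ : Int), Dom_build_string_pyramid h_ → Spec_build_string_pyramid h_ (build_string_pyramid h_)

-- ===== LEMMAS AND PROOFS =====

theorem cjE_cons (x : List Char) (l : List (List Char)) :
    PySem.Chars.join [] (x :: l) = x ++ PySem.Chars.join [] l := by
  cases l with
  | nil => simp [PySem.Chars.join_singleton, PySem.Chars.join_nil]
  | cons z t => rw [PySem.Chars.join_cons_cons]; simp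

theorem cjStar_snoc (xs : List (List Char)) (y : List Char) :
    PySem.Chars.join ['*'] (xs ++ [y]) =
      PySem.Chars.join [] (xs.map (· ++ ['*'])) ++ y := by
  induction xs with
  | nil => simp [PySem.Chars.join_singleton, PySem.Chars.join_nil]
  | cons x xs ih =>
    cases xs with
    | nil =>
      simp [PySem.Chars.join_cons_cons, PySem.Chars.join_singleton]
    | cons z t =>
      simp only [List.cons_append] at ih ⊢
      rw [PySem.Chars.join_cons_cons, ih]
      simp [cjE_cons]

theorem joinE_nil : PySem.Str.join "" ([] : List String) = "" := by
  simp [PySem.Str.join, PySem.Chars.join_nil]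

theorem joinStar_nil : PySem.Str.join "*" ([] : List String) = "" := by
  simp [PySem.Str.join, PySem.Chars.join_nil]

theorem joinE_cons (x : String) (l : List String) :
    PySem.Str.join "" (x :: l) = x ++ PySem.Str.join "" l := by
  simp [PySem.Str.join, cjE_cons, String.ofList_append]

theorem joinE_append (xs ys : List String) :
    PySem.Str.join "" (xs ++ ys) = PySem.Str.join "" xs ++ PySem.Str.join "" ys := by
  induction xs with
  | nil => simp [joinE_nil]
  | cons x xs ih =>
    rw [List.cons_append, joinE_cons, ih, joinE_cons, String.append_assoc]

theorem joinStar_snoc (xs : List String) (y : String) :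
    PySem.Str.join "*" (xs ++ [y]) =
      PySem.Str.join "" (xs.map (· ++ "*")) ++ y := by
  simp only [PySem.Str.join, List.map_append, List.map_cons, List.map_nil]
  rw [show ("*" : String).toList = ['*'] from rfl,
      show ("" : String).toList = ([] : List Char) from rfl, cjStar_snoc]
  rw [String.ofList_append, String.ofList_toList]
  congr 2
  rw [List.map_map, List.map_map]
  refine congrArg _ (List.map_congr_left ?_)
  intro a _
  simp [Function.comp, String.toList_append, show ("*" : String).toList = ['*'] from rfl]

theorem foldl_app (f : Int → String) (xs : List Int) : ∀ (init : String),
    xs.foldl (fun s i => s ++ f i) init = init ++ PySem.Str.join "" (xs.map f) := by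
  induction xs with
  | nil => intro init; simp [joinE_nil]
  | cons x xs ih =>
    intro init
    rw [List.foldl_cons, ih, List.map_cons, joinE_cons, String.append_assoc]

theorem foldl_app2 (g : Int → String) (xs : List Int) (init : String) :
    xs.foldl (fun s i => s ++ g i ++ "\n") init =
      init ++ PySem.Str.join "" (xs.map (fun i => g i ++ "\n")) := by
  simp only [String.append_assoc]
  exact foldl_app (fun i => g i ++ "\n") xs init

theorem line_eq (i : Int) : pvLineA i = pvLineB i := by
  by_cases hi : i ≤ 0
  · rw [pvLineA, pvLineB, PySem.List.pyRange_one_eq_nil (by omega)]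
    simp [joinStar_nil]
  · have h1 : (1:Int) ≤ i := by omega
    rw [pvLineA, pvLineB, PySem.List.pyRange_one_succ_right h1]
    rw [List.foldl_append,
        PySem.List.foldl_congr_mem _ _ (fun s j => s ++ (PySem.Int.toStr j ++ "*")) ""
          (by
            intro acc x hx
            have hxlt : x < i := (PySem.List.mem_pyRange_one.mp hx).2
            simp [hxlt, String.append_assoc]),
        foldl_app]
    simp only [List.foldl_cons, List.foldl_nil, lt_irrefl]
    rw [List.map_append, List.map_cons, List.map_nil, joinStar_snoc]
    rw [String.empty_append, List.map_map]
    rfl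

theorem lines_desc (h_ : Int) :
    (PySem.List.pyRange (h_-1) 0 (-1)).map pvLineB = (pvLinesB h_).dropLast.reverse := by
  have hrev : PySem.List.pyRange (h_-1) 0 (-1) = (PySem.List.pyRange 1 h_ 1).reverse := by
    rw [PySem.List.pyRange_neg_one_eq_reverse]
    norm_num
  by_cases hh : h_ ≤ 0
  · rw [hrev, pvLinesB, PySem.List.pyRange_one_eq_nil (by omega),
        PySem.List.pyRange_one_eq_nil (by omega)]
    simp
  · have h1 : (1:Int) ≤ h_ := by omega
    rw [hrev, pvLinesB, PySem.List.pyRange_one_succ_right h1]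
    rw [List.map_append, List.map_cons, List.map_nil, List.dropLast_concat, List.map_reverse]

theorem ab_eq (h_ : Int) : build_string_pyramid h_ = build_string_pyramid_alt h_ := by
  rw [build_string_pyramid, build_string_pyramid_alt]
  rw [foldl_app2, foldl_app2, String.empty_append]
  rw [PySem.List.slice_to_neg_one, PySem.List.slice?_none_none_neg_one, Option.getD_some]
  rw [List.map_append, joinE_append]
  congr 1
  · rw [pvLinesB, List.map_map]
    simp only [Function.comp_def, line_eq]
  · rw [← lines_desc, List.map_map]
    simp only [Function.comp_def, line_eq]

-- ===== VERDICT (by name: the statement is the Claim_ definition above) =====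
theorem build_string_pyramid_spec : Claim_equal_build_string_pyramid := by
  intro h_ _
  unfold Spec_build_string_pyramid
  exact ab_eq h_
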